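-- pv_equiv track=rewrite | github.com/vanisingh-24/Intro-To-Python | DSA_450_Questions/Strings/012_SplitBinaryStringIntoEqual0sAnd1s.py | maxSub
-- ===== SOURCE A (Python) =====
-- def maxSub(str, n):
--   count0 = 0
--   count1 = 0
--   count = 0
--
--   for i in range(n):
--     if str[i] == '0':
--       count0 += 1
--     else:
--       count1 += 1
--
--     if count0 == count1:
--      count += 1
--
--   if count0 != count1:
--     return -1
--   return count
-- ===== SOURCE B (Python) =====
-- def maxSub(str, n):
--   # Greedy decomposition: repeatedly strip the shortest balanced prefix of
--   # str[:n], counting the strips; a chunk that never rebalances yields -1.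
--   def pieces(s):
--     if not s:
--       return 0
--     bal = 0
--     for k in range(len(s)):
--       bal += 1 if s[k] == '0' else -1
--       if bal == 0:
--         rest = pieces(s[k + 1:])
--         return -1 if rest == -1 else 1 + rest
--     return -1
--   return pieces(str[:n] if n > 0 else "")
-- ===== Notes on version B (the rewrite author's own statement) =====
-- stated objective: alternative
-- what changed: B replaces A's single counting pass (two counters plus an in-loop equality test) by a greedy recursive decomposition: repeatedly strip the shortest balanced prefix of str[:n], count the strips, and propagate -1 when a chunk never rebalances.
import Mathlib
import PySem

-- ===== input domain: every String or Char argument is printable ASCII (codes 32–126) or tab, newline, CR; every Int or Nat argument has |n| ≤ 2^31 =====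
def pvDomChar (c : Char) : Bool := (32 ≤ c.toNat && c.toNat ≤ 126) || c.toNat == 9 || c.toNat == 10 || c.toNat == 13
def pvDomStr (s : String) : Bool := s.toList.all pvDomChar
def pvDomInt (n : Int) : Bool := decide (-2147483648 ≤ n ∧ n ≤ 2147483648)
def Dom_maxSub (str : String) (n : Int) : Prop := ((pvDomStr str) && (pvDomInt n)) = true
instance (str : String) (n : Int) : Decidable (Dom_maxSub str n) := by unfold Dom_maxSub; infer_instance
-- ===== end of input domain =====

-- B replaces A's single counting pass by a greedy recursive decomposition:
-- strip the shortest balanced prefix repeatedly, counting strips, propagating -1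
-- (objective: alternative decomposition, same cost).


-- ===== PORT A =====
-- str[i] is ported as PySem.Str.pyGet?; Pre_ keeps every index in range, so the
-- getD default is never consulted on admitted inputs.
def maxSub (str : String) (n : Int) : Int :=
  let st := (PySem.List.pyRange 0 n 1).foldl
    (fun (s : Int × Int × Int) i =>
      let c := (PySem.Str.pyGet? str i).getD ' '
      let p := if c = '0' then (s.1 + 1, s.2.1) else (s.1, s.2.1 + 1)
      let cnt := if p.1 = p.2 then s.2.2 + 1 else s.2.2
      (p.1, p.2, cnt)) (0, 0, 0)
  if st.1 ≠ st.2.1 then -1 else st.2.2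

-- ===== PORT B =====
-- Source B's inner 'for k …: bal += …; if bal == 0: return …' is the early-returning
-- scan pvScan (returning the suffix s[k+1:] at the first zero balance);
-- pieces is pvPieces; 'str[:n] if n > 0 else ""' is the guarded slice.
def pvScan (bal : Int) : List Char → Option (List Char)
  | [] => none
  | c :: t =>
    let b := bal + (if c = '0' then 1 else -1)
    if b = 0 then some t else pvScan b t

-- termination measure for pvPieces: the suffix pvScan returns is shorter
lemma pvScan_lt (l : List Char) (b : Int) (rest : List Char)
    (h : pvScan b l = some rest) : rest.length < l.length := by
  induction l generalizing b with
  | nil => simp [pvScan] at h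
  | cons c t ih =>
    by_cases hz : b + (if c = '0' then 1 else -1) = 0
    · simp only [pvScan, if_pos hz] at h
      cases h; simp
    · simp only [pvScan, if_neg hz] at h
      exact Nat.lt_trans (ih _ h) (by simp)

def pvPieces (s : List Char) : Int :=
  match s with
  | [] => 0
  | c :: t =>
    match h : pvScan 0 (c :: t) with
    | none => -1
    | some rest =>
      let r := pvPieces rest
      if r = -1 then -1 else 1 + r
termination_by s.length
decreasing_by exact pvScan_lt _ _ _ h

def maxSub_alt (str : String) (n : Int) : Int :=
  pvPieces (if 0 < n then (PySem.Str.slice str none (some n)).toList else [])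

-- ===== PRECONDITION & SPEC =====
-- A indexes str[i] for every i < n, so it raises IndexError exactly when n > len(str).
def Pre_maxSub (str : String) (n : Int) : Prop := n ≤ PySem.Str.len str
instance (str : String) (n : Int) : Decidable (Pre_maxSub str n) := by unfold Pre_maxSub; infer_instance
def pvWitness_maxSub : String × Int := ("0101", 4)

def Spec_maxSub (str : String) (n : Int) (out : Int) : Prop := out = maxSub_alt str n
instance (str : String) (n : Int) (out : Int) : Decidable (Spec_maxSub str n out) := by unfold Spec_maxSub; infer_instance

-- ===== CLAIM (what is proved, stated in full; the proofs are below) =====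
def Claim_equal_maxSub : Prop := ∀ (str : String) (n : Int), Dom_maxSub str n → Pre_maxSub str n → Spec_maxSub str n (maxSub str n)

-- ===== LEMMAS AND PROOFS =====

-- A's loop body as a named step function over characters.
def pvStepA (s : Int × Int × Int) (c : Char) : Int × Int × Int :=
  let p := if c = '0' then (s.1 + 1, s.2.1) else (s.1, s.2.1 + 1)
  (p.1, p.2, if p.1 = p.2 then s.2.2 + 1 else s.2.2)

-- net balance of a chunk ('0' ↦ +1, other ↦ −1)
def pvBal : List Char → Int
  | [] => 0
  | c :: t => (if c = '0' then 1 else -1) + pvBal t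

-- number of zero crossings of the running balance started at b
def pvZ (b : Int) : List Char → Int
  | [] => 0
  | c :: t =>
    let b' := b + (if c = '0' then 1 else -1)
    (if b' = 0 then 1 else 0) + pvZ b' t

lemma pvZ_nonneg (l : List Char) (b : Int) : 0 ≤ pvZ b l := by
  induction l generalizing b with
  | nil => simp [pvZ]
  | cons c t ih =>
    simp only [pvZ]
    have h := ih (b + (if c = '0' then 1 else -1))
    by_cases hz : b + (if c = '0' then 1 else -1) = 0
    · rw [if_pos hz]; omega
    · rw [if_neg hz]; omega

-- A's fold computes the net balance and the crossing count.
lemma pv_foldA (l : List Char) (c0 c1 cnt : Int) :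
    (l.foldl pvStepA (c0, c1, cnt)).1 - (l.foldl pvStepA (c0, c1, cnt)).2.1
        = (c0 - c1) + pvBal l
    ∧ (l.foldl pvStepA (c0, c1, cnt)).2.2 = cnt + pvZ (c0 - c1) l := by
  induction l generalizing c0 c1 cnt with
  | nil => simp [pvBal, pvZ]
  | cons c t ih =>
    simp only [List.foldl_cons, pvBal, pvZ]
    by_cases hc : c = '0'
    · have hs : pvStepA (c0, c1, cnt) c = (c0 + 1, c1, if c0 + 1 = c1 then cnt + 1 else cnt) := by
        simp [pvStepA, hc]
      rw [hs, if_pos hc]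
      obtain ⟨h1, h2⟩ := ih (c0 + 1) c1 (if c0 + 1 = c1 then cnt + 1 else cnt)
      rw [show c0 - c1 + 1 = c0 + 1 - c1 from by ring]
      constructor
      · omega
      · rw [h2]; split_ifs <;> omega
    · have hs : pvStepA (c0, c1, cnt) c = (c0, c1 + 1, if c0 = c1 + 1 then cnt + 1 else cnt) := by
        simp [pvStepA, hc]
      rw [hs, if_neg hc]
      obtain ⟨h1, h2⟩ := ih c0 (c1 + 1) (if c0 = c1 + 1 then cnt + 1 else cnt)
      rw [show c0 - c1 + -1 = c0 - (c1 + 1) from by ring]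
      constructor
      · omega
      · rw [h2]; split_ifs <;> omega

-- If the scan finds a rebalancing point, the chunk splits off one crossing.
lemma pvScan_some (l : List Char) (b : Int) (rest : List Char)
    (h : pvScan b l = some rest) :
    pvZ b l = 1 + pvZ 0 rest ∧ b + pvBal l = pvBal rest := by
  induction l generalizing b with
  | nil => simp [pvScan] at h
  | cons c t ih =>
    simp only [pvZ, pvBal]
    by_cases hz : b + (if c = '0' then 1 else -1) = 0
    · simp only [pvScan, if_pos hz] at h
      cases h
      rw [if_pos hz, hz]
      constructor
      · rfl
      · omega
    · simp only [pvScan, if_neg hz] at h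
      obtain ⟨h1, h2⟩ := ih _ h
      rw [if_neg hz]
      constructor
      · omega
      · omega

-- If the scan never finds one, a nonempty chunk's net balance (from b) is nonzero.
lemma pvScan_none (l : List Char) (b : Int)
    (h : pvScan b l = none) : l = [] ∨ b + pvBal l ≠ 0 := by
  induction l generalizing b with
  | nil => exact Or.inl rfl
  | cons c t ih =>
    right
    by_cases hz : b + (if c = '0' then 1 else -1) = 0
    · simp only [pvScan, if_pos hz] at h
      simp at h
    · simp only [pvScan, if_neg hz] at h
      simp only [pvBal]
      rcases ih _ h with ht | hne
      · subst ht; simp only [pvBal]; omega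
      · omega

-- B's greedy decomposition computes exactly the balance/crossing characterisation.
lemma pvPieces_spec_aux : ∀ (N : Nat) (l : List Char), l.length ≤ N →
    pvPieces l = if pvBal l = 0 then pvZ 0 l else -1 := by
  intro N
  induction N with
  | zero =>
    intro l hl
    have : l = [] := List.eq_nil_of_length_eq_zero (by omega)
    subst this
    simp [pvPieces, pvBal, pvZ]
  | succ N ih =>
    intro l hl
    cases l with
    | nil => simp [pvPieces, pvBal, pvZ]
    | cons c t =>
      rw [pvPieces]
      cases hs : pvScan 0 (c :: t) with
      | none =>
        rcases pvScan_none _ _ hs with h | h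
        · exact absurd h (by simp)
        · rw [if_neg (by omega)]
      | some rest =>
        obtain ⟨h1, h2⟩ := pvScan_some _ _ _ hs
        have hlt := pvScan_lt _ _ _ hs
        have hrest := ih rest (by simp only [List.length_cons] at hlt hl; omega)
        change (if pvPieces rest = (-1 : Int) then (-1 : Int) else 1 + pvPieces rest) = _
        rw [hrest]
        by_cases hbr : pvBal rest = 0
        · have hz := pvZ_nonneg rest 0
          rw [if_pos hbr, if_neg (show ¬ pvZ 0 rest = -1 by omega),
            if_pos (show pvBal (c :: t) = 0 by omega)]
          omega
        · rw [if_neg hbr, if_pos rfl, if_neg (show ¬ pvBal (c :: t) = 0 by omega)]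

lemma pvPieces_spec (l : List Char) :
    pvPieces l = if pvBal l = 0 then pvZ 0 l else -1 :=
  pvPieces_spec_aux l.length l le_rfl

-- A's fold body over indices is pvStepA applied to the indexed character.
lemma pv_bodyA (str : String) :
    (fun (s : Int × Int × Int) (i : Int) =>
      let c := (PySem.Str.pyGet? str i).getD ' '
      let p := if c = '0' then (s.1 + 1, s.2.1) else (s.1, s.2.1 + 1)
      let cnt := if p.1 = p.2 then s.2.2 + 1 else s.2.2
      (p.1, p.2, cnt))
    = fun s i => pvStepA s ((PySem.Str.pyGet? str i).getD ' ') := rfl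

theorem maxSub_spec : Claim_equal_maxSub := by
  intro str n _ hpre
  unfold Spec_maxSub Pre_maxSub at *
  simp only [PySem.Str.len_eq] at hpre
  unfold maxSub maxSub_alt
  rw [pv_bodyA]
  by_cases hn : n ≤ 0
  · rw [PySem.List.pyRange_one_eq_nil hn]
    simp only [List.foldl_nil]
    rw [if_neg (show ¬ (0:Int) < n by omega)]
    simp [pvPieces]
  · have hn0 : (0 : Int) ≤ n := by omega
    rw [if_pos (show (0:Int) < n by omega)]
    have hslice : (PySem.Str.slice str none (some n)).toList = str.toList.take n.toNat := by
      simp [PySem.Str.slice, PySem.List.slice_to _ hn0]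
    rw [hslice]
    set l := str.toList.take n.toNat with hl
    have hlen : (l.length : Int) = n := by
      rw [hl, List.length_take]
      omega
    have hstep : ∀ (acc : Int × Int × Int), ∀ i ∈ PySem.List.pyRange 0 n 1,
        pvStepA acc ((PySem.Str.pyGet? str i).getD ' ')
          = pvStepA acc (PySem.List.pyGetD l i ' ') := by
      intro acc i hi
      rw [PySem.List.mem_pyRange_one] at hi
      have hilen : i < (str.toList.length : Int) := by omega
      simp only [PySem.Str.pyGet?, PySem.Chars.pyGet?]
      rw [PySem.List.pyGet?_eq_some_getElem _ hi.1 (by exact_mod_cast hilen)]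
      rw [PySem.List.pyGetD_eq_getElem _ ' ' hi.1 (by rw [hlen]; exact hi.2)]
      simp [hl, List.getElem_take]
    have hA : (PySem.List.pyRange 0 n 1).foldl
          (fun acc i => pvStepA acc ((PySem.Str.pyGet? str i).getD ' ')) (0, 0, 0)
        = l.foldl pvStepA (0, 0, 0) := by
      rw [PySem.List.foldl_congr_mem _ _ _ _ hstep]
      rw [show n = PySem.List.len l by rw [PySem.List.len_eq, hlen]]
      exact PySem.List.foldl_pyRange_zero_pyGetD l ' ' pvStepA (0, 0, 0)
    rw [hA, pvPieces_spec]
    obtain ⟨h1, h2⟩ := pv_foldA l 0 0 0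
    rw [show (0 : Int) - 0 = 0 from rfl] at h1 h2
    show (if (l.foldl pvStepA (0, 0, 0)).1 ≠ (l.foldl pvStepA (0, 0, 0)).2.1
        then -1 else (l.foldl pvStepA (0, 0, 0)).2.2) = _
    split_ifs <;> omega
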